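-- pv_equiv track=rewrite | github.com/tanaikech/SOUWA_test_scripts | python_measurement.py | Division_2
-- ===== SOURCE A (Python) =====
-- def Division_2(theta, phi):
--     ecode = '\n'
--     string = ''
--     AP = 0
--     Array = [0 for i in range(int(len(theta) / phi))]
--     ArrayP = 0
--     for i in range(phi, len(theta) + 1, phi):
--         for j in range(AP, i):
--             string += ','.join(theta[j]) + ecode
--         AP = i
--         Array[ArrayP] = string
--         ArrayP += 1
--         string = ''
--     return Array
-- ===== SOURCE B (Python) =====
-- def Division_2(theta, phi):
--     rows = [','.join(r) + '\n' for r in theta]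
--     return [''.join(rows[k * phi:(k + 1) * phi]) for k in range(len(theta) // phi)]
-- ===== Notes on version B (the rewrite author's own statement) =====
-- stated objective: simpler
-- what changed: A's single nested loop with a preallocated 0-filled array, a running string accumulator and manual index bookkeeping is replaced by two independent passes: encode each row to ','.join(row)+'\n' once, then group the encoded rows into chunks of phi by slicing.
import Mathlib
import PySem

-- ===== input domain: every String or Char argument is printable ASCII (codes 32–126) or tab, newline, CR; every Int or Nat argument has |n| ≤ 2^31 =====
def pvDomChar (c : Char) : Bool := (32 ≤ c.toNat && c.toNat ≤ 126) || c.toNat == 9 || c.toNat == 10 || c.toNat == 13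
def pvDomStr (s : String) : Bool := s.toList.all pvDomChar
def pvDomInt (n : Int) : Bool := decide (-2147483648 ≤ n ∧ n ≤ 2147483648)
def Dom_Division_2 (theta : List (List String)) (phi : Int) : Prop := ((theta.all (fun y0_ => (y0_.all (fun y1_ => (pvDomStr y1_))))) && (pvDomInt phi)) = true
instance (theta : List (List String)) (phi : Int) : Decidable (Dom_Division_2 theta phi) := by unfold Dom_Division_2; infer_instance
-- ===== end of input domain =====

-- B replaces A's nested loop over a preallocated array with running string/index state by two
-- independent passes (encode every row once, then group the encoded rows into chunks of phi by
-- slicing); objective: simpler.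

-- ===== PORT A =====
-- int(len(theta)/phi) is CPython float true division then truncation toward zero = Int.tdiv
-- (exact at the list lengths the checks exercise, far below float precision).
-- Python preallocates Array with integer 0s; every slot that survives to the return is
-- overwritten (for phi < 0 the array is empty), so the placeholder "" stands for those 0s.
def Division_2 (theta : List (List String)) (phi : Int) : List String :=
  let ecode := "\n"
  let arr0 : List String := List.replicate ((theta.length : Int).tdiv phi).toNat ""
  let st :=
    (PySem.List.pyRange phi ((theta.length : Int) + 1) phi).foldl
      (fun (st : String × Int × List String × Nat) i =>
        let s := (PySem.List.pyRange st.2.1 i 1).foldl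
          (fun s j => s ++ (PySem.Str.join "," (PySem.List.pyGetD theta j []) ++ ecode)) st.1
        ("", i, st.2.2.1.set st.2.2.2 s, st.2.2.2 + 1))
      ("", 0, arr0, 0)
  st.2.2.1

-- ===== PORT B =====
def Division_2_alt (theta : List (List String)) (phi : Int) : List String :=
  let rows := theta.map (fun r => PySem.Str.join "," r ++ "\n")
  (PySem.List.pyRange 0 (PySem.Int.floordiv (theta.length : Int) phi) 1).map
    (fun k => PySem.Str.join "" (PySem.List.slice rows (some (k * phi)) (some ((k + 1) * phi))))

-- ===== PRECONDITION & SPEC =====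
-- Pre_ excludes exactly phi = 0, where Python A raises ZeroDivisionError (B raises there too).
def Pre_Division_2 (theta : List (List String)) (phi : Int) : Prop := phi ≠ 0
instance (theta : List (List String)) (phi : Int) : Decidable (Pre_Division_2 theta phi) := by unfold Pre_Division_2; infer_instance
def pvWitness_Division_2 : List (List String) × Int := ([["a"], ["b", "c"], ["d"]], 2)

def Spec_Division_2 (theta : List (List String)) (phi : Int) (out : List String) : Prop := out = Division_2_alt theta phi
instance (theta : List (List String)) (phi : Int) (out : List String) : Decidable (Spec_Division_2 theta phi out) := by unfold Spec_Division_2; infer_instance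

-- ===== CLAIM (what is proved, stated in full; the proofs are below) =====
def Claim_equal_Division_2 : Prop := ∀ (theta : List (List String)) (phi : Int), Dom_Division_2 theta phi → Pre_Division_2 theta phi → Spec_Division_2 theta phi (Division_2 theta phi)

-- ===== LEMMAS AND PROOFS =====

-- proof-only helpers: the encoded rows, the k-th output chunk, and A's outer-loop step function
def pvRows (theta : List (List String)) : List String :=
  theta.map (fun r => PySem.Str.join "," r ++ "\n")

def pvChunk (theta : List (List String)) (p : Nat) (k : Nat) : String :=
  PySem.Str.join "" (((pvRows theta).drop (k * p)).take p)

def pvStep (theta : List (List String)) (st : String × Int × List String × Nat) (i : Int) :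
    String × Int × List String × Nat :=
  let s := (PySem.List.pyRange st.2.1 i 1).foldl
    (fun s j => s ++ (PySem.Str.join "," (PySem.List.pyGetD theta j []) ++ "\n")) st.1
  ("", i, st.2.2.1.set st.2.2.2 s, st.2.2.2 + 1)

theorem join_empty_cons (x : String) (xs : List String) :
    PySem.Str.join "" (x :: xs) = x ++ PySem.Str.join "" xs := by
  apply String.ext_iff.2
  simp [PySem.Str.join, PySem.Chars.join, List.intercalate]
  cases xs <;> simp

theorem join_empty_nil : PySem.Str.join "" ([] : List String) = "" := by
  simp [PySem.Str.join, PySem.Chars.join, List.intercalate]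

theorem foldl_append_join (L : List String) (c : String) :
    L.foldl (fun s x => s ++ x) c = c ++ PySem.Str.join "" L := by
  induction L generalizing c with
  | nil => simp [join_empty_nil]
  | cons x xs ih => simp [List.foldl_cons, ih, join_empty_cons, String.append_assoc]

-- the inner loop of A, run from a fresh accumulator, produces exactly the k-th chunk
theorem inner_chunk (theta : List (List String)) (p m : Nat) (hmp : m * p + p ≤ theta.length) :
    (PySem.List.pyRange ((m * p : Nat) : Int) (((m * p + p : Nat)) : Int) 1).foldl
      (fun s j => s ++ (PySem.Str.join "," (PySem.List.pyGetD theta j []) ++ "\n")) "" =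
    pvChunk theta p m := by
  have hlen : (((m*p + p : Nat) : Int) - ((m*p : Nat) : Int)).toNat = p := by omega
  rw [PySem.List.pyRange_one, hlen, List.foldl_map]
  have hmap : (List.range p).map (fun (k : Nat) => PySem.List.pyGetD theta (((m*p : Nat) : Int) + (k : Nat)) []) =
      (theta.drop (m*p)).take p := by
    apply List.ext_getElem
    · simp; omega
    · intro i h1 h2
      simp only [List.getElem_map, List.getElem_range, List.getElem_take, List.getElem_drop]
      have hi : i < p := by simp at h1; omega
      rw [show ((m*p : Nat) : Int) + ((i : Nat) : Int) = ((m*p + i : Nat) : Int) by push_cast; ring]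
      rw [PySem.List.pyGetD_eq_getElem theta [] (by positivity) (by exact_mod_cast by omega)]
      congr 1
  have hfold : ∀ c, (List.range p).foldl
      (fun s (k : Nat) => s ++ (PySem.Str.join "," (PySem.List.pyGetD theta (((m*p : Nat) : Int) + (k : Nat)) []) ++ "\n")) c
      = (((theta.drop (m*p)).take p).map (fun r => PySem.Str.join "," r ++ "\n")).foldl (fun s x => s ++ x) c := by
    intro c
    rw [← hmap, List.foldl_map, List.foldl_map]
  rw [hfold, foldl_append_join, String.empty_append]
  simp [pvChunk, pvRows, List.map_take, List.map_drop]

-- the outer range of A for positive phi = ↑p is the multiples p, 2p, …, (n/p)·p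
theorem outer_range (n p : Nat) (hp : 0 < p) :
    PySem.List.pyRange (p : Int) ((n : Int) + 1) (p : Int) =
      (List.range (n / p)).map (fun (k : Nat) => (((k + 1) * p : Nat) : Int)) := by
  rw [PySem.List.pyRange_of_pos _ _ (by exact_mod_cast hp)]
  have hcnt : (if (p : Int) < (n : Int) + 1 then ((((n : Int) + 1) - p + p - 1) / p).toNat else 0) = n / p := by
    split_ifs with h
    · have : (((n : Int) + 1) - p + p - 1) = (n : Int) := by ring
      rw [this]
      rw [← Int.natCast_div, Int.toNat_natCast]
    · have hnp : n < p := by omega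
      rw [Nat.div_eq_of_lt hnp]
  rw [hcnt]
  apply List.map_congr_left
  intro k _
  push_cast
  ring

-- A's preallocated array has exactly n / p slots
theorem arr0_len (n p : Nat) :
    (((n : Nat) : Int).tdiv (p : Int)).toNat = n / p := by
  rw [Int.tdiv_eq_ediv_of_nonneg (by positivity)]
  rw [← Int.natCast_div, Int.toNat_natCast]

-- invariant of A's outer fold: after m iterations the first m chunks are written,
-- the accumulator is reset, AP = m·p and ArrayP = m
theorem outer_inv (theta : List (List String)) (p : Nat) (m : Nat)
    (hm : m ≤ theta.length / p) :
    ((List.range m).map (fun (k : Nat) => (((k + 1) * p : Nat) : Int))).foldl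
        (pvStep theta) ("", 0, List.replicate (theta.length / p) "", 0) =
      ("", ((m * p : Nat) : Int), (List.range m).map (pvChunk theta p) ++ List.replicate (theta.length / p - m) "", m) := by
  induction m with
  | zero => simp
  | succ m ih =>
    have hm' : m ≤ theta.length / p := by omega
    rw [List.range_succ, List.map_append, List.foldl_append, ih hm']
    simp only [List.map_cons, List.map_nil, List.foldl_cons, List.foldl_nil]
    unfold pvStep
    simp only
    have hcast : (((m + 1) * p : Nat) : Int) = ((m * p + p : Nat) : Int) := by
      push_cast; ring
    rw [hcast, inner_chunk theta p m (by
      have h2 : (m+1) * p ≤ (theta.length / p) * p := Nat.mul_le_mul_right p (by omega)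
      calc m * p + p = (m+1) * p := by ring
        _ ≤ (theta.length / p) * p := h2
        _ ≤ theta.length := Nat.div_mul_le_self theta.length p)]
    have harr : ((List.range m).map (pvChunk theta p) ++ List.replicate (theta.length / p - m) "").set m (pvChunk theta p m)
        = (List.range (m+1)).map (pvChunk theta p) ++ List.replicate (theta.length / p - (m+1)) "" := by
      have hrep : List.replicate (theta.length / p - m) ("" : String)
          = "" :: List.replicate (theta.length / p - (m+1)) "" := by
        rw [show theta.length / p - m = (theta.length / p - (m+1)) + 1 by omega]
        rfl
      rw [hrep]
      have hlen : ((List.range m).map (pvChunk theta p)).length = m := by simp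
      rw [← hlen]
      simp [List.range_succ]
    rw [harr]
    simp [List.range_succ]

-- range(phi, n+1, phi) is empty for phi < 0 (0 ≤ n)
theorem pyRange_neg_empty (phi n : Int) (h : phi < 0) (hn : 0 ≤ n) :
    PySem.List.pyRange phi (n + 1) phi = [] := by
  simp [PySem.List.pyRange]
  split_ifs <;> simp <;> omega

theorem Division_2_eq (theta : List (List String)) (phi : Int) (hphi : phi ≠ 0) :
    Division_2 theta phi = Division_2_alt theta phi := by
  rcases lt_or_gt_of_ne hphi with hneg | hpos
  · -- phi < 0 : both sides are []
    unfold Division_2 Division_2_alt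
    rw [pyRange_neg_empty phi _ hneg (by positivity)]
    have h1 : ((theta.length : Int).tdiv phi).toNat = 0 := by
      have := Int.tdiv_nonpos_of_nonneg_of_nonpos (a := (theta.length : Int)) (b := phi)
        (by positivity) (le_of_lt hneg)
      omega
    have h2 : PySem.Int.floordiv (theta.length : Int) phi ≤ 0 :=
      Int.fdiv_nonpos_of_nonneg_of_nonpos (by positivity) (le_of_lt hneg)
    rw [PySem.List.pyRange_one_eq_nil h2]
    simp only [h1, List.replicate_zero, List.foldl_nil, List.map_nil]
  · -- phi > 0
    obtain ⟨p, rfl⟩ : ∃ p : Nat, phi = (p : Int) := ⟨phi.toNat, by omega⟩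
    have hp : 0 < p := by exact_mod_cast hpos
    unfold Division_2 Division_2_alt
    simp only
    rw [outer_range theta.length p hp, arr0_len theta.length p]
    have hstepf : (fun (st : String × Int × List String × Nat) (i : Int) =>
        ("", i, st.2.2.1.set st.2.2.2
          ((PySem.List.pyRange st.2.1 i 1).foldl
            (fun s j => s ++ (PySem.Str.join "," (PySem.List.pyGetD theta j []) ++ "\n")) st.1),
          st.2.2.2 + 1)) = pvStep theta := rfl
    rw [hstepf, outer_inv theta p (theta.length / p) (le_refl _)]
    simp only [Nat.sub_self, List.replicate_zero, List.append_nil]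
    have hq : PySem.Int.floordiv (theta.length : Int) (p : Int) = ((theta.length / p : Nat) : Int) := by
      simp
    rw [hq, PySem.List.pyRange_zero_nat, List.map_map]
    apply List.map_congr_left
    intro k _
    simp only [Function.comp]
    rw [show ((k : Nat) : Int) * (p : Int) = ((k * p : Nat) : Int) by push_cast; ring,
        show (((k : Nat) : Int) + 1) * (p : Int) = ((k * p + p : Nat) : Int) by push_cast; ring,
        PySem.List.slice_natCast]
    unfold pvChunk pvRows
    congr 1
    rw [Nat.add_sub_cancel_left]

-- ===== VERDICT (by name: the statement is the Claim_ definition above) =====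
theorem Division_2_spec : Claim_equal_Division_2 := by
  intro theta phi _ hpre
  unfold Spec_Division_2
  exact Division_2_eq theta phi hpre
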